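-- pv_equiv track=rewrite | github.com/opendilab/LightZero | lzero/mcts/buffer/game_buffer_maez.py | compute_all_filters
-- ===== SOURCE A (Python) =====
-- def compute_all_filters(data, num_unroll_steps):
--     data_by_iter = []
--     for iter in range(num_unroll_steps + 1):
--         iter_data = [x for i, x in enumerate(data)
--                     if (i + 1) % (num_unroll_steps + 1) ==
--                     ((num_unroll_steps + 1 - iter) % (num_unroll_steps + 1))]
--         data_by_iter.append(iter_data)
--     return data_by_iter
-- ===== SOURCE B (Python) =====
-- def compute_all_filters(data, num_unroll_steps):
--     k = num_unroll_steps + 1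
--     if k <= 0:
--         return []
--     buckets = [[] for _ in range(k)]
--     for i, x in enumerate(data):
--         buckets[(i + 1) % k].append(x)
--     return [buckets[0]] + [buckets[k - j] for j in range(1, k)]
-- ===== Notes on version B (the rewrite author's own statement) =====
-- stated objective: faster
-- what changed: Replaces the k passes over data (one filtered scan per iter) by a single pass that drops each element into the bucket of its index residue mod k, then lists the buckets in A's order [0, k-1, ..., 1].
import Mathlib
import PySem

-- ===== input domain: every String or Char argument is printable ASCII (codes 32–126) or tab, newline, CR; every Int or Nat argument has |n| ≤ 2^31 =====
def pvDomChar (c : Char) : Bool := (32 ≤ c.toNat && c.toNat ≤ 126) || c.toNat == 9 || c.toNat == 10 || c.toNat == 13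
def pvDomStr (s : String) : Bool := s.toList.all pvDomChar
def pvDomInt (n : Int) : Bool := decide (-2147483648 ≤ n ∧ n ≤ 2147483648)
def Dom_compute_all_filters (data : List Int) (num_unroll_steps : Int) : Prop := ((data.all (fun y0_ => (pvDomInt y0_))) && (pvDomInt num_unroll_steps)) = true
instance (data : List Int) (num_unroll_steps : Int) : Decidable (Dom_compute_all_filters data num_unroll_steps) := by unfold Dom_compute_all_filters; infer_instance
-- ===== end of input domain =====

-- B buckets each element once by its index residue mod (num_unroll_steps+1) instead of scanning data once per iter (faster, asymptotic).

-- ===== PORT A =====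
def compute_all_filters (data : List Int) (num_unroll_steps : Int) : List (List Int) :=
  (PySem.List.pyRange 0 (num_unroll_steps + 1) 1).foldl
    (fun data_by_iter iter =>
      data_by_iter ++ [((PySem.List.enumerate data).filter (fun p =>
        PySem.Int.mod (p.1 + 1) (num_unroll_steps + 1) ==
        PySem.Int.mod (num_unroll_steps + 1 - iter) (num_unroll_steps + 1))).map (·.2)]) []

-- ===== PORT B =====
def compute_all_filters_alt (data : List Int) (num_unroll_steps : Int) : List (List Int) :=
  let k := num_unroll_steps + 1
  if k ≤ 0 then []
  else
    let buckets0 := (PySem.List.pyRange 0 k 1).map (fun _ => ([] : List Int))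
    let buckets := (PySem.List.enumerate data).foldl
      (fun bs p => bs.set (PySem.Int.mod (p.1 + 1) k).toNat
                     (bs.getD (PySem.Int.mod (p.1 + 1) k).toNat [] ++ [p.2])) buckets0
    [buckets.getD 0 []] ++ (PySem.List.pyRange 1 k 1).map (fun j => buckets.getD (k - j).toNat [])

-- ===== PRECONDITION & SPEC =====
def Spec_compute_all_filters (data : List Int) (num_unroll_steps : Int) (out : List (List Int)) : Prop := out = compute_all_filters_alt data num_unroll_steps
instance (data : List Int) (num_unroll_steps : Int) (out : List (List Int)) : Decidable (Spec_compute_all_filters data num_unroll_steps out) := by unfold Spec_compute_all_filters; infer_instance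

-- ===== CLAIM (what is proved, stated in full; the proofs are below) =====
def Claim_equal_compute_all_filters : Prop := ∀ (data : List Int) (num_unroll_steps : Int), Dom_compute_all_filters data num_unroll_steps → Spec_compute_all_filters data num_unroll_steps (compute_all_filters data num_unroll_steps)

-- ===== LEMMAS AND PROOFS =====

-- bucket j after the fold = previous content ++ the elements whose residue is j, in order
theorem pv_fold_getD (k : Int) (l : List (Int × Int)) (bs : List (List Int)) (j : Nat)
    (hj : j < bs.length)
    (hl : ∀ p ∈ l, (PySem.Int.mod (p.1 + 1) k).toNat < bs.length) :
    (l.foldl (fun bs p => bs.set (PySem.Int.mod (p.1 + 1) k).toNat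
        (bs.getD (PySem.Int.mod (p.1 + 1) k).toNat [] ++ [p.2])) bs).getD j []
      = bs.getD j [] ++ ((l.filter (fun p => (PySem.Int.mod (p.1 + 1) k).toNat == j)).map (·.2)) := by
  induction l generalizing bs with
  | nil => simp
  | cons p l ih =>
    have hr : (PySem.Int.mod (p.1 + 1) k).toNat < bs.length := hl p (by simp)
    rw [List.foldl_cons]
    rw [ih _ (by simpa using hj) (by intro q hq; simpa using hl q (by simp [hq]))]
    by_cases h : (PySem.Int.mod (p.1 + 1) k).toNat = j
    · subst h
      simp [List.getD_eq_getElem?_getD, hr]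
    · simp [List.getD_eq_getElem?_getD, List.getElem?_set_ne (by omega : (PySem.Int.mod (p.1 + 1) k).toNat ≠ j), h]

-- ===== VERDICT (by name: the statement is the Claim_ definition above) =====
-- initial buckets: k.toNat empty lists
theorem pv_buckets0_getD (k : Int) (j : Nat) :
    ((PySem.List.pyRange 0 k 1).map (fun _ => ([] : List Int))).getD j [] = [] := by
  rw [List.getD_eq_getElem?_getD, List.getElem?_map]
  cases h : (PySem.List.pyRange 0 k 1)[j]? <;> simp

theorem pv_buckets0_length (k : Int) :
    ((PySem.List.pyRange 0 k 1).map (fun _ => ([] : List Int))).length = k.toNat := by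
  rw [List.length_map, PySem.List.length_pyRange_one]; omega

theorem pv_mod_bounds (k a : Int) (hk : 0 < k) (_ha : 0 ≤ a) :
    0 ≤ PySem.Int.mod a k ∧ PySem.Int.mod a k < k := by
  rw [PySem.Int.mod_eq_emod_of_pos hk]
  exact ⟨Int.emod_nonneg a (by omega), Int.emod_lt_of_pos a hk⟩

theorem pv_fst_nonneg (data : List Int) (p : Int × Int) (hp : p ∈ PySem.List.enumerate data 0) :
    0 ≤ p.1 := by
  rcases (PySem.List.mem_enumerate_iff data 0 p).1 hp with ⟨m, hm, rfl⟩
  simp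

-- bucket r of B = the elements of data whose python residue (i+1) % k equals r, for 0 ≤ r < k
theorem pv_bucket_eq (data : List Int) (k : Int) (hk : 0 < k) (j : Nat) (hj : (j : Int) < k) :
    ((PySem.List.enumerate data).foldl
      (fun bs p => bs.set (PySem.Int.mod (p.1 + 1) k).toNat
        (bs.getD (PySem.Int.mod (p.1 + 1) k).toNat [] ++ [p.2]))
      ((PySem.List.pyRange 0 k 1).map (fun _ => ([] : List Int)))).getD j []
    = (((PySem.List.enumerate data).filter
        (fun p => (PySem.Int.mod (p.1 + 1) k).toNat == j)).map (·.2)) := by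
  rw [pv_fold_getD k _ _ j (by rw [pv_buckets0_length]; omega)
      (by
        intro p hp
        rw [pv_buckets0_length]
        have h1 := pv_mod_bounds k (p.1 + 1) hk (by have := pv_fst_nonneg data p hp; omega)
        omega),
    pv_buckets0_getD]
  simp

theorem compute_all_filters_spec : Claim_equal_compute_all_filters := by
  intro data num_unroll_steps _
  unfold Spec_compute_all_filters compute_all_filters compute_all_filters_alt
  by_cases hkpos : num_unroll_steps + 1 ≤ 0
  · rw [PySem.List.pyRange_one_eq_nil (by omega)]
    simp [hkpos]
  · rw [not_le] at hkpos
    simp only [if_neg (by omega : ¬ num_unroll_steps + 1 ≤ 0)]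
    rw [PySem.List.foldl_append_singleton_eq_map, List.nil_append]
    conv_lhs => rw [PySem.List.pyRange_one_cons (by omega : (0:Int) < num_unroll_steps + 1),
      List.map_cons]
    rw [List.singleton_append, zero_add]
    congr 1
    · -- head: iter = 0, residue (k - 0) % k = 0
      rw [pv_bucket_eq data _ (by omega) 0 (by omega)]
      congr 1
      apply List.filter_congr
      intro p hp
      have h0 := pv_fst_nonneg data p hp
      have hb := pv_mod_bounds (num_unroll_steps + 1) (p.1 + 1) (by omega) (by omega)
      rw [PySem.Int.mod_eq_emod_of_pos (a := num_unroll_steps + 1 - 0) (by omega)]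
      simp only [sub_zero, Int.emod_self]
      rw [Bool.eq_iff_iff]
      simp only [beq_iff_eq]
      omega
    · -- tail: iter = j ∈ [1, k), residue (k - j) % k = k - j
      apply List.map_congr_left
      intro j hj
      have hjr := PySem.List.mem_pyRange_one.1 hj
      rw [pv_bucket_eq data _ (by omega) (num_unroll_steps + 1 - j).toNat (by omega)]
      congr 1
      apply List.filter_congr
      intro p hp
      have h0 := pv_fst_nonneg data p hp
      have hb := pv_mod_bounds (num_unroll_steps + 1) (p.1 + 1) (by omega) (by omega)
      rw [PySem.Int.mod_eq_emod_of_pos (a := num_unroll_steps + 1 - j) (by omega),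
        Int.emod_eq_of_lt (by omega) (by omega)]
      rw [Bool.eq_iff_iff]
      simp only [beq_iff_eq]
      omega
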